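-- pv_equiv track=rewrite | github.com/Lazy-Coder-03/python-2023 | 2023-pyhton/Pracsset1/ques2.py | monotonically_asc
-- ===== SOURCE A (Python) =====
-- def monotonically_asc(arr):
--     startInd=0
--     for i in range(len(arr)-1):
--         if arr[i]>arr[i+1]:
--             startInd=i+1
--     if len(arr[startInd:])<=1:
--         return None
--     else:
--         return arr[startInd:]
-- ===== SOURCE B (Python) =====
-- def monotonically_asc(arr):
--     if not arr:
--         return None
--     i = len(arr) - 1
--     while i > 0 and arr[i - 1] <= arr[i]:
--         i -= 1
--     if len(arr) - i <= 1:
--         return None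
--     return arr[i:]
-- ===== Notes on version B (the rewrite author's own statement) =====
-- stated objective: alternative
-- what changed: A scans the whole array forward recording the index after the last descent; B walks backward from the end, stopping at the first descent from the right, so it reads only the trailing non-decreasing run.
import Mathlib
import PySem

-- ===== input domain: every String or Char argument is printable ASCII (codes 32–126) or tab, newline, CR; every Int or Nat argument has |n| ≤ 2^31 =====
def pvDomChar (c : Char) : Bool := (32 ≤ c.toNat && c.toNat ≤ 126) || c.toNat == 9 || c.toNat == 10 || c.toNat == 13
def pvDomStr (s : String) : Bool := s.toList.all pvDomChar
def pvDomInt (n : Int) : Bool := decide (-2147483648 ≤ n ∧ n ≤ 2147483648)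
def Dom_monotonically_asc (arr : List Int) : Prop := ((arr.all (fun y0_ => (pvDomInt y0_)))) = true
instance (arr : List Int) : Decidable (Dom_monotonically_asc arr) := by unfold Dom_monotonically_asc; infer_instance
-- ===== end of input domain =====

-- B walks backward from the end to the start of the trailing non-decreasing run instead of
-- A's forward scan recording the index after the last descent; same return values everywhere.

-- ===== PORT A =====
def monotonically_asc (arr : List Int) : Option (List Int) :=
  let startInd : Int :=
    (PySem.List.pyRange 0 ((arr.length : Int) - 1) 1).foldl
      (fun s i =>
        if PySem.List.pyGetD arr i 0 > PySem.List.pyGetD arr (i + 1) 0 then i + 1 else s) 0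
  let suffix := PySem.List.slice arr (some startInd) none
  if (suffix.length : Int) ≤ 1 then none else some suffix

-- ===== PORT B =====
-- backward while-loop of Source B: decrement i while i > 0 and arr[i-1] <= arr[i]
def maAltLoop (arr : List Int) : Nat → Nat
  | 0 => 0
  | i + 1 => if arr.getD i 0 ≤ arr.getD (i + 1) 0 then maAltLoop arr i else i + 1

def monotonically_asc_alt (arr : List Int) : Option (List Int) :=
  if arr = [] then none
  else
    let i := maAltLoop arr (arr.length - 1)
    if arr.length - i ≤ 1 then none else some (arr.drop i)

-- ===== PRECONDITION & SPEC =====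
def Spec_monotonically_asc (arr : List Int) (out : Option (List Int)) : Prop := out = monotonically_asc_alt arr
instance (arr : List Int) (out : Option (List Int)) : Decidable (Spec_monotonically_asc arr out) := by unfold Spec_monotonically_asc; infer_instance

-- ===== CLAIM (what is proved, stated in full; the proofs are below) =====
def Claim_equal_monotonically_asc : Prop := ∀ (arr : List Int), Dom_monotonically_asc arr → Spec_monotonically_asc arr (monotonically_asc arr)

-- ===== LEMMAS AND PROOFS =====

theorem maAltLoop_le (arr : List Int) (n : Nat) : maAltLoop arr n ≤ n := by
  induction n with
  | zero => simp [maAltLoop]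
  | succ k ih =>
    simp only [maAltLoop]
    split
    · omega
    · omega

-- A's forward fold over range(0, n) computes exactly B's backward loop started at n.
theorem fold_eq_altLoop (arr : List Int) (n : Nat) :
    (PySem.List.pyRange 0 (n : Int) 1).foldl
      (fun s i =>
        if PySem.List.pyGetD arr i 0 > PySem.List.pyGetD arr (i + 1) 0 then i + 1 else s) 0
      = (maAltLoop arr n : Int) := by
  induction n with
  | zero => simp [PySem.List.pyRange_one_eq_nil, maAltLoop]
  | succ k ih =>
    have hcast : ((k + 1 : Nat) : Int) = (k : Int) + 1 := by push_cast; ring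
    rw [hcast, PySem.List.pyRange_one_succ_right (by positivity), List.foldl_append, ih]
    simp only [List.foldl_cons, List.foldl_nil, maAltLoop]
    have h1 : PySem.List.pyGetD arr (k : Int) 0 = arr.getD k 0 := by
      simp [PySem.List.pyGetD_natCast]
    have h2 : PySem.List.pyGetD arr ((k : Int) + 1) 0 = arr.getD (k + 1) 0 := by
      rw [show ((k : Int) + 1) = ((k + 1 : Nat) : Int) by push_cast; ring,
        PySem.List.pyGetD_natCast]
    rw [h1, h2]
    by_cases h : arr.getD k 0 ≤ arr.getD (k + 1) 0
    · rw [if_neg (not_lt.mpr h), if_pos h]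
    · rw [if_pos (lt_of_not_ge h), if_neg h]; push_cast; ring

-- ===== VERDICT (by name: the statement is the Claim_ definition above) =====
theorem monotonically_asc_spec : Claim_equal_monotonically_asc := by
  intro arr _
  unfold Spec_monotonically_asc monotonically_asc monotonically_asc_alt
  by_cases hnil : arr = []
  · subst hnil; decide
  · have hlen : 1 ≤ arr.length := by
      cases arr with
      | nil => exact absurd rfl hnil
      | cons a t => simp
    have hlc : (arr.length : Int) - 1 = ((arr.length - 1 : Nat) : Int) := by
      push_cast [hlen]; ring
    rw [hlc, fold_eq_altLoop arr (arr.length - 1)]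
    set k := maAltLoop arr (arr.length - 1) with hk
    have hkle : k ≤ arr.length - 1 := maAltLoop_le arr _
    simp only [PySem.List.slice_from_natCast, if_neg hnil, List.length_drop]
    have hiff : ((arr.length - k : Nat) : Int) ≤ 1 ↔ arr.length - k ≤ 1 := by omega
    by_cases h : arr.length - k ≤ 1
    · simp [hiff.mpr h, h]
    · simp [h]
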